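-- pv_equiv track=rewrite | github.com/michaelwlu/algo-patterns-new | merge-intervals/task-scheduler.py | least_time
-- ===== SOURCE A (Python) =====
-- import heapq
-- from collections import deque, Counter
--
-- def least_time(tasks, n):
--     # count frequency of each task
--     freq = Counter(tasks)
--
--     # create max heap of frequency values (convert to negative for use in python's min heap)
--     heap = [-count for count in freq.values()]
--     heapq.heapify(heap)
--
--     queue = deque()  # pairs of (-count, next_time)
--     time = 0
--
--     while heap or queue:
--         time += 1
--
--         if heap:
--             count = heapq.heappop(heap)
--             count += 1
--
--             if count < 0:
--                 queue.append((count, time + n))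
--
--         if queue and queue[0][1] == time:
--             heapq.heappush(heap, queue.popleft()[0])
--
--     return time
-- ===== SOURCE B (Python) =====
-- from collections import Counter
--
-- def least_time(tasks, n):
--     # closed form: the max-frequency tasks force (m-1) gaps of length n+1,
--     # then the k1 max-frequency tasks finish; everything else either fits in
--     # the gaps or extends the schedule to exactly len(tasks).
--     if not tasks:
--         return 0
--     counts = list(Counter(tasks).values())
--     m = max(counts)
--     k1 = counts.count(m)
--     return max(len(tasks), (m - 1) * (n + 1) + k1)
-- ===== Notes on version B (the rewrite author's own statement) =====
-- stated objective: faster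
-- what changed: Replaces the heap-and-cooldown-queue simulation of every time slot with the closed-form answer max(len(tasks), (maxfreq-1)*(n+1) + count_of_maxfreq) computed in one pass over the frequency table.
import Mathlib
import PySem

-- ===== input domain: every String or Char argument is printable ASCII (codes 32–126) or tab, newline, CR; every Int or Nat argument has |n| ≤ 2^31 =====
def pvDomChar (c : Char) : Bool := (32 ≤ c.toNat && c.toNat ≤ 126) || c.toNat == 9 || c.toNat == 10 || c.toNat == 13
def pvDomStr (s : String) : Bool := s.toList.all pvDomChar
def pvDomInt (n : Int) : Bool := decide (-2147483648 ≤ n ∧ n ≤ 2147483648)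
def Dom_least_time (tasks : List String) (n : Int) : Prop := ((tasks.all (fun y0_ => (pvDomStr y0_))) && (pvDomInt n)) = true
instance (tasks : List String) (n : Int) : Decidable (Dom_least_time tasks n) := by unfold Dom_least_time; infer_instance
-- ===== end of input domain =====

-- B is the closed-form answer max(len(tasks), (maxfreq-1)*(n+1) + #maxfreq) instead of A's
-- step-by-step heap/cooldown-queue simulation (asymptotically faster; equal return values on Pre_).

-- ===== PORT A =====
-- A's while loop.  The Python heap of ints is modelled as an ascending sorted list: exact,
-- because only the heap's multiset content and pop-min/push are ever observed.
-- popStep: "if heap: count = heappop(heap) + 1; if count < 0: queue.append((count, time + n))"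
def popStep (heap : List Int) (queue : List (Int × Int)) (time1 n : Int) :
    List Int × List (Int × Int) :=
  match heap with
  | [] => ([], queue)
  | c0 :: rest =>
    if c0 + 1 < 0 then (rest, queue ++ [(c0 + 1, time1 + n)]) else (rest, queue)

-- frontStep: "if queue and queue[0][1] == time: heappush(heap, queue.popleft()[0])"
def frontStep (heap : List Int) (queue : List (Int × Int)) (time1 : Int) :
    List Int × List (Int × Int) :=
  match queue with
  | (c, r) :: qs =>
    if r = time1 then (List.orderedInsert (· ≤ ·) c heap, qs) else (heap, (c, r) :: qs)
  | [] => (heap, [])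

-- The fuel argument only makes the recursion structural; on Pre_ it is proved sufficient.
def leastLoop (n : Int) : Nat → List Int → List (Int × Int) → Int → Int
  | 0, _, _, time => time
  | fuel + 1, heap, queue, time =>
    if heap = [] ∧ queue = [] then time
    else
      let p := popStep heap queue (time + 1) n
      let p2 := frontStep p.1 p.2 (time + 1)
      leastLoop n fuel p2.1 p2.2 (time + 1)

def least_time (tasks : List String) (n : Int) : Int :=
  let freq := PySem.Dict.counter tasks
  -- heap = [-count for count in freq.values()]; heapq.heapify(heap)  (heapify = ascending sort)
  let heap := PySem.List.sorted ((freq.values).map (fun c => -c)) (fun x => x) false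
  leastLoop n (tasks.length * (n.toNat + 2) + 1) heap [] 0

-- ===== PORT B =====
def least_time_alt (tasks : List String) (n : Int) : Int :=
  if tasks = [] then 0
  else
    let counts := (PySem.Dict.counter tasks).values
    let m := (PySem.List.max? counts (fun v => v)).getD 0
    let k1 := PySem.List.count counts m
    max (PySem.List.len tasks) ((m - 1) * (n + 1) + k1)

-- ===== PRECONDITION & SPEC =====
-- Pre_ excludes exactly the inputs on which A never returns: with n < 0 and a task occurring
-- twice, A re-queues the task with a ready time in the past that the queue-front check never
-- matches again, so the while loop runs forever.
def Pre_least_time (tasks : List String) (n : Int) : Prop := 0 ≤ n ∨ tasks.Nodup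
instance (tasks : List String) (n : Int) : Decidable (Pre_least_time tasks n) := by
  unfold Pre_least_time; infer_instance
def pvWitness_least_time : List String × Int := (["a", "b", "a"], 1)

def Spec_least_time (tasks : List String) (n : Int) (out : Int) : Prop := out = least_time_alt tasks n
instance (tasks : List String) (n : Int) (out : Int) : Decidable (Spec_least_time tasks n out) := by
  unfold Spec_least_time; infer_instance

-- ===== CLAIM (what is proved, stated in full; the proofs are below) =====
def Claim_equal_least_time : Prop := ∀ (tasks : List String) (n : Int), Dom_least_time tasks n → Pre_least_time tasks n → Spec_least_time tasks n (least_time tasks n)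

-- ===== LEMMAS AND PROOFS =====

-- ---- the potential function Φ on (heap-counts, cooldown items (count, start)) ----

/-- positive counts of the heap part -/
def hcOf (heap : List Int) : List Int := heap.map (fun x => -x)
/-- (positive count, relative start) of the queue part, at current time `t` -/
def qcOf (t : Int) (queue : List (Int × Int)) : List (Int × Int) :=
  queue.map (fun p => (-p.1, p.2 - t + 1))

/-- number of queue items of count `v` with start ≥ `s` -/
def qcnt (v s : Int) (qc : List (Int × Int)) : Int :=
  (qc.countP (fun p => decide (p.1 = v ∧ s ≤ p.2)) : Int)

/-- total number of items of count `v` (heap + queue; queue starts are ≥ 1) -/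
def cntC (v : Int) (hc : List Int) (qc : List (Int × Int)) : Int :=
  (hc.count v : Int) + qcnt v 1 qc

def betaH (n : Int) (hc : List Int) (qc : List (Int × Int)) (v : Int) : Int :=
  (v - 1) * (n + 1) + cntC v hc qc

def betaQ (n : Int) (hc : List Int) (qc : List (Int × Int)) (p : Int × Int) : Int :=
  (p.1 - 1) * (n + 1) + p.2 + qcnt p.1 p.2 qc + (if p.2 ≤ 1 then (hc.count p.1 : Int) else 0) - 1

def fmax (l : List Int) : Int := l.foldr max 0

def bnd (n : Int) (hc : List Int) (qc : List (Int × Int)) : Int :=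
  fmax (hc.map (betaH n hc qc) ++ qc.map (betaQ n hc qc))

def sumC (hc : List Int) (qc : List (Int × Int)) : Int :=
  hc.sum + (qc.map Prod.fst).sum

def phi (n : Int) (hc : List Int) (qc : List (Int × Int)) : Int :=
  max (sumC hc qc) (bnd n hc qc)

-- ---- fmax ----
lemma le_fmax {l : List Int} {x : Int} (hx : x ∈ l) : x ≤ fmax l := by
  induction l with
  | nil => cases hx
  | cons a t ih =>
    rcases List.mem_cons.1 hx with h | h
    · simp [fmax, h]
    · exact le_trans (ih h) (by simp only [fmax, List.foldr]; exact le_max_right _ _)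

lemma fmax_nonneg (l : List Int) : 0 ≤ fmax l := by
  induction l with
  | nil => simp [fmax]
  | cons a t ih => simp only [fmax, List.foldr] at *; exact le_trans ih (le_max_right _ _)

lemma fmax_le {l : List Int} {c : Int} (h0 : 0 ≤ c) (h : ∀ x ∈ l, x ≤ c) : fmax l ≤ c := by
  induction l with
  | nil => simpa [fmax]
  | cons a t ih =>
    simp only [fmax, List.foldr] at *
    exact max_le (h a (by simp)) (ih (fun x hx => h x (by simp [hx])))

lemma fmax_pos_mem {l : List Int} (h : 0 < fmax l) : fmax l ∈ l := by
  induction l with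
  | nil => simp [fmax] at h
  | cons a t ih =>
    simp only [fmax, List.foldr] at *
    rcases le_total (t.foldr max 0) a with hc | hc
    · simp [max_eq_left hc]
    · rw [max_eq_right hc] at *
      exact List.mem_cons_of_mem _ (ih h)

lemma fmax_congr {l l' : List Int} (h : ∀ x, x ∈ l ↔ x ∈ l') : fmax l = fmax l' := by
  refine le_antisymm ?_ ?_
  · exact fmax_le (fmax_nonneg _) (fun x hx => le_fmax ((h x).1 hx))
  · exact fmax_le (fmax_nonneg _) (fun x hx => le_fmax ((h x).2 hx))

-- ---- counting ----
lemma qcnt_nonneg (v s : Int) (qc : List (Int × Int)) : 0 ≤ qcnt v s qc := by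
  simp [qcnt]

lemma qcnt_cons (v s : Int) (p : Int × Int) (qc : List (Int × Int)) :
    qcnt v s (p :: qc) = qcnt v s qc + (if p.1 = v ∧ s ≤ p.2 then 1 else 0) := by
  simp only [qcnt, List.countP_cons]
  by_cases h : p.1 = v ∧ s ≤ p.2 <;> simp [h]

lemma qcnt_append (v s : Int) (qc qc' : List (Int × Int)) :
    qcnt v s (qc ++ qc') = qcnt v s qc + qcnt v s qc' := by
  simp [qcnt, List.countP_append]

lemma qcnt_shift (v s : Int) (qc : List (Int × Int)) :
    qcnt v s (qc.map (fun p => (p.1, p.2 - 1))) = qcnt v (s + 1) qc := by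
  simp only [qcnt, List.countP_map]
  congr 1
  apply List.countP_congr
  intro p _
  simp only [Function.comp, decide_eq_true_eq]
  omega

lemma qcnt_congr_ge (v : Int) (qc : List (Int × Int)) (h2 : ∀ p ∈ qc, 2 ≤ p.2) :
    qcnt v 1 qc = qcnt v 2 qc := by
  simp only [qcnt]
  congr 1
  apply List.countP_congr
  intro p hp
  have := h2 p hp
  simp only [decide_eq_true_eq]
  omega

/-- distinct increasing values in [a, b] : at most b - a + 1 of them -/
lemma len_pairwise_lt {l : List Int} {a b : Int} (hpw : l.Pairwise (· < ·))
    (hab : a ≤ b + 1) (hmem : ∀ x ∈ l, a ≤ x ∧ x ≤ b) : (l.length : Int) ≤ b - a + 1 := by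
  induction l generalizing a with
  | nil => simpa using by omega
  | cons x t ih =>
    have hx := hmem x (by simp)
    have ht : ∀ y ∈ t, x + 1 ≤ y ∧ y ≤ b := by
      intro y hy
      exact ⟨by have := (List.pairwise_cons.1 hpw).1 y hy; omega, (hmem y (by simp [hy])).2⟩
    have := ih (List.pairwise_cons.1 hpw).2 (by omega) ht
    simp only [List.length_cons]
    push_cast
    omega

/-- count of queue items with count v and start ≥ s is bounded when starts are distinct ≤ b -/
lemma qcnt_le_interval {qc : List (Int × Int)} {v s b : Int}
    (hpw : (qc.map Prod.snd).Pairwise (· < ·)) (hb : ∀ p ∈ qc, p.2 ≤ b) (hsb : s ≤ b + 1) :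
    qcnt v s qc ≤ b - s + 1 := by
  have h1 : qcnt v s qc ≤ (((qc.map Prod.snd).filter (fun x => decide (s ≤ x))).length : Int) := by
    rw [← List.countP_eq_length_filter, List.countP_map]
    simp only [qcnt]
    have := List.countP_mono_left (l := qc)
      (p := fun p => decide (p.1 = v ∧ s ≤ p.2)) (q := (fun x => decide (s ≤ x)) ∘ Prod.snd)
      (by intro a ha; simp only [Function.comp]; rw [decide_eq_true_eq, decide_eq_true_eq]; omega)
    exact_mod_cast this
  refine le_trans h1 (len_pairwise_lt (List.Pairwise.filter _ hpw) hsb ?_)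
  intro x hx
  rcases List.mem_filter.1 hx with ⟨hm, hs⟩
  rw [decide_eq_true_eq] at hs
  rcases List.mem_map.1 hm with ⟨p, hp, rfl⟩
  exact ⟨hs, hb p hp⟩

-- ---- sums vs class counts ----
lemma sum_ge_classes {l : List Int} (hpos : ∀ x ∈ l, 1 ≤ x) (v w : Int) (hvw : v ≠ w) :
    v * l.count v + w * l.count w ≤ l.sum := by
  induction l with
  | nil => simp
  | cons a t ih =>
    have ha := hpos a (by simp)
    have iht := ih (fun x hx => hpos x (by simp [hx]))
    simp only [List.sum_cons, List.count_cons, beq_iff_eq]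
    rcases eq_or_ne a v with rfl | h1
    · rw [if_pos rfl, if_neg (by omega)]
      push_cast; nlinarith [iht, ha]
    · rcases eq_or_ne a w with rfl | h2
      · rw [if_neg (by omega), if_pos rfl]
        push_cast; nlinarith [iht, ha]
      · rw [if_neg (by omega), if_neg (by omega)]
        push_cast; nlinarith [iht, ha]

lemma sum_ge_class {l : List Int} (hpos : ∀ x ∈ l, 1 ≤ x) (v : Int) :
    v * l.count v ≤ l.sum := by
  induction l with
  | nil => simp
  | cons a t ih =>
    have ha := hpos a (by simp)
    have iht := ih (fun x hx => hpos x (by simp [hx]))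
    simp only [List.sum_cons, List.count_cons, beq_iff_eq]
    rcases eq_or_ne a v with rfl | h1
    · rw [if_pos rfl]; push_cast; nlinarith [iht, ha]
    · rw [if_neg (by omega)]; push_cast; nlinarith [iht, ha]

-- ---- pure arithmetic domination lemmas ----
lemma dom1 {v m kv km N W : Int} (hv : 1 ≤ v) (hvm : v + 1 ≤ m) (hkv : 1 ≤ kv)
    (hkm : 1 ≤ km) (hN : 1 ≤ N) (hW : v * kv + m * km ≤ W) :
    (v - 1) * N + kv ≤ max W ((m - 1) * N + km) - 1 := by
  rcases le_or_gt kv N with h | h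
  · have : (v - 1) * N + kv ≤ (m - 1) * N + km - 1 := by nlinarith
    exact le_trans this (by have := le_max_right W ((m - 1) * N + km); omega)
  · have : (v - 1) * N + kv ≤ W - 1 := by nlinarith
    exact le_trans this (by have := le_max_left W ((m - 1) * N + km); omega)

lemma dom2 {m kv km N W : Int} (hm : 2 ≤ m) (hkv : 0 ≤ kv)
    (hkm : 1 ≤ km) (hN : 1 ≤ N) (hW : (m - 1) * kv + m * km ≤ W) :
    (m - 2) * N + kv + 1 ≤ max W ((m - 1) * N + km) - 1 := by
  rcases le_or_gt (kv + 1) N with h | h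
  · have : (m - 2) * N + kv + 1 ≤ (m - 1) * N + km - 1 := by nlinarith
    exact le_trans this (by have := le_max_right W ((m - 1) * N + km); omega)
  · have : (m - 2) * N + kv + 1 ≤ W - 1 := by nlinarith
    exact le_trans this (by have := le_max_left W ((m - 1) * N + km); omega)

-- ---- further counting helpers ----
lemma qcnt_pos_of_mem {qc : List (Int × Int)} {v s s' : Int}
    (h : (v, s) ∈ qc) (hs : s' ≤ s) : 1 ≤ qcnt v s' qc := by
  simp only [qcnt]
  have : 0 < qc.countP (fun p => decide (p.1 = v ∧ s' ≤ p.2)) := by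
    rw [List.countP_pos_iff]
    exact ⟨(v, s), h, by simp; omega⟩
  exact_mod_cast this

lemma qcnt_eq_zero_of_gt {qc : List (Int × Int)} {v s b : Int}
    (hb : ∀ p ∈ qc, p.2 ≤ b) (hs : b < s) : qcnt v s qc = 0 := by
  have h0 : qc.countP (fun p => decide (p.1 = v ∧ s ≤ p.2)) = 0 :=
    List.countP_eq_zero.2 (by intro p hp; have := hb p hp; simp only [decide_eq_true_eq]; omega)
  simp only [qcnt, h0]
  simp

/-- the first queue item of a class has the smallest start, so it sees the whole class -/
lemma first_class_mem {qc : List (Int × Int)} {v : Int}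
    (hpw : (qc.map Prod.snd).Pairwise (· < ·)) (hpos : 1 ≤ qcnt v 1 qc)
    (hs1 : ∀ p ∈ qc, 1 ≤ p.2) :
    ∃ p ∈ qc, p.1 = v ∧ qcnt v p.2 qc = qcnt v 1 qc := by
  induction qc with
  | nil => simp [qcnt] at hpos
  | cons q rest ih =>
    have hpw2 : List.Pairwise (· < ·) (q.2 :: rest.map Prod.snd) := by simpa using hpw
    obtain ⟨hlt0, hpw'⟩ := List.pairwise_cons.1 hpw2
    have hlt : ∀ p ∈ rest, q.2 < p.2 := fun p hp => hlt0 p.2 (List.mem_map_of_mem hp)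
    by_cases hqv : q.1 = v
    · refine ⟨q, by simp, hqv, ?_⟩
      rw [qcnt_cons, qcnt_cons]
      have e1 : qcnt v q.2 rest = qcnt v 1 rest := by
        simp only [qcnt]
        congr 1
        apply List.countP_congr
        intro p hp
        have h1 := hlt p hp
        have h2 := hs1 p (by simp [hp])
        simp only [decide_eq_true_eq]
        omega
      have h2 := hs1 q (by simp)
      rw [e1]
      simp [hqv]
      omega
    · have hpos' : 1 ≤ qcnt v 1 rest := by
        rw [qcnt_cons] at hpos
        simpa [hqv] using hpos
      rcases ih hpw' hpos' (fun p hp => hs1 p (by simp [hp])) with ⟨p, hp, hp1, hp2⟩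
      refine ⟨p, by simp [hp], hp1, ?_⟩
      rw [qcnt_cons, qcnt_cons, hp2]
      simp [hqv]

lemma sum_le_classBound {l : List Int} {c : Int} (h : ∀ x ∈ l, 1 ≤ x ∧ x ≤ c) :
    l.sum ≤ (c - 1) * l.length + l.count c := by
  induction l with
  | nil => simp
  | cons a t ih =>
    have ha := h a (by simp)
    have iht := ih (fun x hx => h x (by simp [hx]))
    simp only [List.sum_cons, List.count_cons, List.length_cons, beq_iff_eq]
    rcases eq_or_ne a c with rfl | h1
    · rw [if_pos rfl]; push_cast; nlinarith [iht]
    · rw [if_neg h1]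
      have hac : a ≤ c - 1 := by omega
      push_cast; nlinarith [iht]

lemma qcnt_one_eq_count {v : Int} {qc : List (Int × Int)} (hs : ∀ p ∈ qc, 1 ≤ p.2) :
    qcnt v 1 qc = ((qc.map Prod.fst).count v : Int) := by
  simp only [qcnt, List.count, List.countP_map]
  congr 1
  apply List.countP_congr
  intro p hp
  have := hs p hp
  simp only [Function.comp, decide_eq_true_eq, beq_iff_eq]
  omega

lemma cntC_eq_count {v : Int} {hc : List Int} {qc : List (Int × Int)}
    (hs : ∀ p ∈ qc, 1 ≤ p.2) :
    cntC v hc qc = ((hc ++ qc.map Prod.fst).count v : Int) := by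
  rw [List.count_append]
  simp only [cntC, qcnt_one_eq_count hs]
  push_cast
  ring

lemma sumC_eq_sum (hc : List Int) (qc : List (Int × Int)) :
    sumC hc qc = (hc ++ qc.map Prod.fst).sum := by
  simp [sumC, List.sum_append]

lemma sumC_nonneg {hc : List Int} {qc : List (Int × Int)}
    (h1 : ∀ v ∈ hc, 1 ≤ v) (h2 : ∀ p ∈ qc, 1 ≤ p.1) : 0 ≤ sumC hc qc := by
  rw [sumC_eq_sum]
  apply List.sum_nonneg
  intro x hx
  rcases List.mem_append.1 hx with h | h
  · exact le_trans (by norm_num) (h1 x h)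
  · rcases List.mem_map.1 h with ⟨p, hp, rfl⟩
    exact le_trans (by norm_num) (h2 p hp)

/-- W ≥ v·(#class v) + m·(#class m) -/
lemma W_classes {v m : Int} {hc : List Int} {qc : List (Int × Int)}
    (hvm : v ≠ m) (hpos : ∀ x ∈ hc, 1 ≤ x) (hq : ∀ p ∈ qc, 1 ≤ p.1) (hs : ∀ p ∈ qc, 1 ≤ p.2) :
    v * cntC v hc qc + m * cntC m hc qc ≤ sumC hc qc := by
  rw [cntC_eq_count hs, cntC_eq_count hs, sumC_eq_sum]
  apply sum_ge_classes _ v m hvm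
  intro x hx
  rcases List.mem_append.1 hx with h | h
  · exact hpos x h
  · rcases List.mem_map.1 h with ⟨p, hp, rfl⟩
    exact hq p hp

lemma W_class {v : Int} {hc : List Int} {qc : List (Int × Int)}
    (hpos : ∀ x ∈ hc, 1 ≤ x) (hq : ∀ p ∈ qc, 1 ≤ p.1) (hs : ∀ p ∈ qc, 1 ≤ p.2) :
    v * cntC v hc qc ≤ sumC hc qc := by
  rw [cntC_eq_count hs, sumC_eq_sum]
  apply sum_ge_class _ v
  intro x hx
  rcases List.mem_append.1 hx with h | h
  · exact hpos x h
  · rcases List.mem_map.1 h with ⟨p, hp, rfl⟩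
    exact hq p hp

-- ---- phi under heap permutation and the queue-front move ----
lemma phi_perm (n : Int) {hc hc' : List Int} (qc : List (Int × Int)) (h : hc.Perm hc') :
    phi n hc qc = phi n hc' qc := by
  have hbh : betaH n hc qc = betaH n hc' qc := by
    funext v; simp [betaH, cntC, h.count_eq]
  have hbq : betaQ n hc qc = betaQ n hc' qc := by
    funext p; simp [betaQ, h.count_eq]
  have hsum : sumC hc qc = sumC hc' qc := by simp [sumC, h.sum_eq]
  have hbnd : bnd n hc qc = bnd n hc' qc := by
    simp only [bnd, hbh, hbq]
    apply fmax_congr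
    intro x
    simp only [List.mem_append, List.mem_map]
    constructor <;> rintro (⟨a, ha, rfl⟩ | ⟨a, ha, rfl⟩)
    · exact Or.inl ⟨a, h.mem_iff.1 ha, rfl⟩
    · exact Or.inr ⟨a, ha, rfl⟩
    · exact Or.inl ⟨a, h.mem_iff.2 ha, rfl⟩
    · exact Or.inr ⟨a, ha, rfl⟩
  simp [phi, hsum, hbnd]

lemma move_phi (n v : Int) (hc : List Int) (rest : List (Int × Int))
    (hrest2 : ∀ p ∈ rest, 2 ≤ p.2) :
    phi n hc ((v, 1) :: rest) = phi n (v :: hc) rest := by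
  have hcnt : ∀ w, cntC w hc ((v, 1) :: rest) = cntC w (v :: hc) rest := by
    intro w
    simp only [cntC, qcnt_cons, List.count_cons, beq_iff_eq]
    by_cases hw : v = w
    · rw [if_pos (by simp [hw]), if_pos (by omega)]
      push_cast; ring
    · rw [if_neg (by simp; omega), if_neg (by omega)]
      push_cast; ring
  have hbh : betaH n hc ((v, 1) :: rest) = betaH n (v :: hc) rest := by
    funext w; simp only [betaH, hcnt w]
  have hbq : ∀ p ∈ rest, betaQ n hc ((v, 1) :: rest) p = betaQ n (v :: hc) rest p := by
    intro p hp
    have h2 := hrest2 p hp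
    have e1 : ((v, 1) : Int × Int).1 = v := rfl
    have e2 : ((v, 1) : Int × Int).2 = 1 := rfl
    simp only [betaQ, qcnt_cons, e1, e2]
    rw [if_neg (by omega), if_neg (by omega), if_neg (by omega)]
    ring
  have hmoved : betaQ n hc ((v, 1) :: rest) (v, 1) = betaH n (v :: hc) rest v := by
    have e1 : ((v, 1) : Int × Int).1 = v := rfl
    have e2 : ((v, 1) : Int × Int).2 = 1 := rfl
    simp only [betaQ, betaH, cntC, qcnt_cons, List.count_cons, beq_iff_eq, e1, e2]
    norm_num
    push_cast; ring
  have hsum : sumC hc ((v, 1) :: rest) = sumC (v :: hc) rest := by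
    simp only [sumC, List.map_cons, List.sum_cons]; ring
  have hbnd : bnd n hc ((v, 1) :: rest) = bnd n (v :: hc) rest := by
    apply fmax_congr
    intro x
    simp only [bnd, List.mem_append, List.mem_map, List.mem_cons]
    constructor
    · rintro (⟨a, ha, rfl⟩ | ⟨a, (rfl | ha), rfl⟩)
      · exact Or.inl ⟨a, Or.inr ha, by rw [hbh]⟩
      · exact Or.inl ⟨v, Or.inl rfl, by rw [hmoved]⟩
      · exact Or.inr ⟨a, ha, by rw [hbq a ha]⟩
    · rintro (⟨a, (rfl | ha), rfl⟩ | ⟨a, ha, rfl⟩)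
      · exact Or.inr ⟨(a, 1), Or.inl rfl, by rw [hmoved]⟩
      · exact Or.inl ⟨a, ha, by rw [hbh]⟩
      · exact Or.inr ⟨a, Or.inr ha, by rw [hbq a ha]⟩
  simp only [phi, hsum, hbnd]

-- ---- the idle core: with an empty heap the bound strictly dominates the work ----
lemma idle_bnd_gt {n : Int} {qc : List (Int × Int)} (hn : 0 ≤ n) (hne : qc ≠ [])
    (hq : ∀ p ∈ qc, 1 ≤ p.1 ∧ 2 ≤ p.2 ∧ p.2 ≤ n + 1)
    (hpw : (qc.map Prod.snd).Pairwise (· < ·)) :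
    sumC [] qc + 1 ≤ bnd n [] qc := by
  obtain ⟨q0, hq0⟩ := List.exists_mem_of_ne_nil qc hne
  set cstar := fmax (qc.map Prod.fst) with hcs
  have hc1 : 1 ≤ cstar := le_trans (hq q0 hq0).1 (le_fmax (List.mem_map_of_mem hq0))
  have hmem : cstar ∈ qc.map Prod.fst := fmax_pos_mem (by omega)
  obtain ⟨pm, hpm, hpm1⟩ := List.mem_map.1 hmem
  have hqc1 : 1 ≤ qcnt cstar 1 qc := by
    have hpm' : (cstar, pm.2) ∈ qc := by rw [← hpm1]; simpa using hpm
    exact qcnt_pos_of_mem hpm' (by have := (hq pm hpm).2.1; omega)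
  obtain ⟨ps, hps, hps1, hps2⟩ := first_class_mem hpw hqc1 (fun p hp => by have := (hq p hp).2.1; omega)
  have hB : betaQ n [] qc ps ≤ bnd n [] qc := by
    apply le_fmax
    simp only [List.mem_append, List.mem_map]
    exact Or.inr ⟨ps, hps, rfl⟩
  have hBval : betaQ n [] qc ps = (cstar - 1) * (n + 1) + ps.2 + qcnt cstar 1 qc - 1 := by
    have h2 := (hq ps hps).2.1
    simp only [betaQ, hps1, hps2]
    rw [if_neg (by omega)]
    ring
  have hW : sumC [] qc ≤ (cstar - 1) * qc.length + qcnt cstar 1 qc := by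
    have hb := sum_le_classBound (l := qc.map Prod.fst) (c := cstar)
      (fun x hx => by
        rcases List.mem_map.1 hx with ⟨p, hp, rfl⟩
        exact ⟨(hq p hp).1, le_fmax (List.mem_map_of_mem hp)⟩)
    rw [qcnt_one_eq_count (fun p hp => by have := (hq p hp).2.1; omega)]
    simpa [sumC, List.length_map] using hb
  have hlen : (qc.length : Int) ≤ n := by
    have := len_pairwise_lt (a := 2) (b := n + 1) hpw (by omega)
      (fun x hx => by
        rcases List.mem_map.1 hx with ⟨p, hp, rfl⟩
        exact ⟨(hq p hp).2.1, (hq p hp).2.2⟩)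
    rw [List.length_map] at this
    omega
  have h2 := (hq ps hps).2.1
  nlinarith [hB, hBval, hW, hlen, hqc1, hc1, h2]

-- ---- one loop iteration, heap empty (idle step) ----
lemma step_idle {n : Int} {qc : List (Int × Int)} (hn : 0 ≤ n) (hne : qc ≠ [])
    (hq : ∀ p ∈ qc, 1 ≤ p.1 ∧ 2 ≤ p.2 ∧ p.2 ≤ n + 1)
    (hpw : (qc.map Prod.snd).Pairwise (· < ·)) :
    phi n [] (qc.map (fun p => (p.1, p.2 - 1))) = phi n [] qc - 1 := by
  have hcore := idle_bnd_gt hn hne hq hpw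
  have hsum : sumC [] (qc.map (fun p => (p.1, p.2 - 1))) = sumC [] qc := by
    simp only [sumC, List.map_map]
    rfl
  -- each shifted term equals its source term minus one
  have hterm : ∀ p ∈ qc,
      betaQ n [] (qc.map (fun p => (p.1, p.2 - 1))) (p.1, p.2 - 1) = betaQ n [] qc p - 1 := by
    intro p hp
    have h2 := (hq p hp).2.1
    have e := qcnt_shift p.1 (p.2 - 1) qc
    have e2 : p.2 - 1 + 1 = p.2 := by ring
    simp only [betaQ, List.count_nil, Nat.cast_zero, ite_self, e, e2]
    ring
  have hWpos : 0 ≤ sumC [] qc :=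
    sumC_nonneg (by simp) (fun p hp => (hq p hp).1)
  have hcore' : sumC [] qc + 1 ≤ fmax (qc.map (betaQ n [] qc)) := by
    have : bnd n [] qc = fmax (qc.map (betaQ n [] qc)) := by
      simp [bnd]
    linarith [hcore, this.symm.le, this.le]
  have hbnd : bnd n [] (qc.map (fun p => (p.1, p.2 - 1))) = bnd n [] qc - 1 := by
    simp only [bnd, List.map_nil, List.nil_append]
    apply le_antisymm
    · apply fmax_le (by linarith)
      intro x hx
      obtain ⟨p', hp', rfl⟩ := List.mem_map.1 hx
      obtain ⟨a, ha, rfl⟩ := List.mem_map.1 hp'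
      rw [hterm a ha]
      have hle := le_fmax (List.mem_map_of_mem (f := betaQ n [] qc) ha)
      linarith
    · have hpos : 0 < fmax (qc.map (betaQ n [] qc)) := by linarith
      have hmem := fmax_pos_mem hpos
      obtain ⟨p, hp, hpe⟩ := List.mem_map.1 hmem
      have hle : betaQ n [] (qc.map (fun q => (q.1, q.2 - 1))) (p.1, p.2 - 1)
          ≤ fmax ((qc.map (fun q => (q.1, q.2 - 1))).map
              (betaQ n [] (qc.map (fun q => (q.1, q.2 - 1))))) :=
        le_fmax (List.mem_map_of_mem (List.mem_map_of_mem hp))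
      rw [hterm p hp, hpe] at hle
      linarith
  have hbq : bnd n [] qc = fmax (qc.map (betaQ n [] qc)) := by simp [bnd]
  simp only [phi, hsum, hbnd]
  rw [max_eq_right (by linarith), max_eq_right (by linarith)]

-- ---- one loop iteration, heap nonempty ----
lemma step_phi {n m : Int} {hrest : List Int} {qc : List (Int × Int)}
    (hn : 0 ≤ n) (hm : 1 ≤ m) (hmaxr : ∀ v ∈ hrest, v ≤ m) (hposr : ∀ v ∈ hrest, 1 ≤ v)
    (hq : ∀ p ∈ qc, 1 ≤ p.1 ∧ 2 ≤ p.2 ∧ p.2 ≤ n + 1)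
    (hpw : (qc.map Prod.snd).Pairwise (· < ·)) :
    phi n hrest (qc.map (fun p => (p.1, p.2 - 1)) ++ if 2 ≤ m then [(m - 1, n + 1)] else [])
      = phi n (m :: hrest) qc - 1 := by
  set qS := qc.map (fun p => (p.1, p.2 - 1)) with hqS
  set A := if 2 ≤ m then [((m : Int) - 1, n + 1)] else [] with hA
  set qc' := qS ++ A with hqc'
  have h2s : ∀ p ∈ qc, 2 ≤ p.2 := fun p hp => (hq p hp).2.1
  have hbN : ∀ p ∈ qc, p.2 ≤ n + 1 := fun p hp => (hq p hp).2.2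
  have hq1 : ∀ p ∈ qc, 1 ≤ p.1 := fun p hp => (hq p hp).1
  have hposall : ∀ x ∈ m :: hrest, 1 ≤ x := by
    intro x hx; rcases List.mem_cons.1 hx with rfl | hx
    · exact hm
    · exact hposr x hx
  have hs1 : ∀ p ∈ qc, 1 ≤ p.2 := fun p hp => by have := h2s p hp; omega
  -- counting identities
  have e_A : ∀ v s : Int, qcnt v s A = if 2 ≤ m ∧ m - 1 = v ∧ s ≤ n + 1 then 1 else 0 := by
    intro v s
    rw [hA]
    by_cases hm2 : 2 ≤ m
    · rw [if_pos hm2, qcnt_cons]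
      have h0 : qcnt v s ([] : List (Int × Int)) = 0 := by simp [qcnt]
      rw [h0]
      by_cases hc : m - 1 = v ∧ s ≤ n + 1
      · rw [if_pos (by exact ⟨hc.1, hc.2⟩), if_pos (by exact ⟨hm2, hc.1, hc.2⟩)]
        omega
      · rw [if_neg (by exact fun h => hc ⟨h.1, h.2⟩), if_neg (by exact fun h => hc ⟨h.2.1, h.2.2⟩)]
        simp
    · rw [if_neg hm2, if_neg (by exact fun h => hm2 h.1)]
      simp [qcnt]
  have e_q' : ∀ v s : Int, qcnt v s qc' = qcnt v (s + 1) qc +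
      (if 2 ≤ m ∧ m - 1 = v ∧ s ≤ n + 1 then 1 else 0) := by
    intro v s
    rw [hqc', qcnt_append, hqS, qcnt_shift, e_A]
  have e1q : ∀ v : Int, qcnt v 1 qc = qcnt v 2 qc := fun v => qcnt_congr_ge v qc h2s
  have cnt_new : ∀ v : Int, cntC v hrest qc' = cntC v (m :: hrest) qc -
      (if m = v then 1 else 0) + (if 2 ≤ m ∧ m - 1 = v then 1 else 0) := by
    intro v
    have e2 := e_q' v 1
    have hcnt_cons : ((m :: hrest).count v : Int) =
        (hrest.count v : Int) + (if m = v then 1 else 0) := by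
      rw [List.count_cons]
      by_cases hv : m = v
      · rw [if_pos (beq_iff_eq.2 hv), if_pos hv]; push_cast; ring
      · rw [if_neg (by simpa using hv), if_neg hv]; push_cast; ring
    have e12 : (1 : Int) + 1 = 2 := by norm_num
    simp only [cntC, e2, e12, e1q v, hcnt_cons]
    by_cases hw : 2 ≤ m ∧ m - 1 = v
    · rw [if_pos (by exact ⟨hw.1, hw.2, by omega⟩), if_pos hw]
      ring
    · rw [if_neg (by intro h; exact hw ⟨h.1, h.2.1⟩), if_neg hw]
      ring
  have sum_new : sumC hrest qc' = sumC (m :: hrest) qc - 1 := by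
    have emap : (qS.map Prod.fst) = qc.map Prod.fst := by
      rw [hqS, List.map_map]; rfl
    rw [hqc', hA]
    by_cases hm2 : 2 ≤ m
    · rw [if_pos hm2]
      simp only [sumC, List.map_append, List.sum_append, emap, List.map_cons, List.sum_cons,
        List.map_nil, List.sum_nil]
      ring
    · rw [if_neg hm2]
      simp only [sumC, List.append_nil, emap, List.sum_cons]
      have hm1 : m = 1 := by omega
      rw [hm1]; ring
  -- old bound facts
  have hcm1 : 1 ≤ cntC m (m :: hrest) qc := by
    have h1 : 1 ≤ ((m :: hrest).count m : Int) := by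
      rw [List.count_cons_self]; push_cast; omega
    have h2 := qcnt_nonneg m 1 qc
    simp only [cntC] at *; omega
  have hOHm_le : (m - 1) * (n + 1) + cntC m (m :: hrest) qc ≤ bnd n (m :: hrest) qc := by
    apply le_fmax
    simp only [List.mem_append, List.mem_map]
    exact Or.inl ⟨m, List.mem_cons_self, rfl⟩
  have hW_le_phi : sumC (m :: hrest) qc ≤ phi n (m :: hrest) qc := le_max_left _ _
  have hbnd_le_phi : bnd n (m :: hrest) qc ≤ phi n (m :: hrest) qc := le_max_right _ _
  have hmn0 : 0 ≤ (m - 1) * (n + 1) := mul_nonneg (by omega) (by omega)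
  have hphi1 : 1 ≤ phi n (m :: hrest) qc := by linarith
  have hOQval : ∀ p ∈ qc, betaQ n (m :: hrest) qc p =
      (p.1 - 1) * (n + 1) + p.2 + qcnt p.1 p.2 qc - 1 := by
    intro p hp
    have := h2s p hp
    simp only [betaQ]
    rw [if_neg (by omega)]
    ring
  have hOQ_le : ∀ p ∈ qc, betaQ n (m :: hrest) qc p ≤ bnd n (m :: hrest) qc := by
    intro p hp
    apply le_fmax
    simp only [List.mem_append, List.mem_map]
    exact Or.inr ⟨p, hp, rfl⟩
  have hOQ_bound : ∀ p ∈ qc, betaQ n (m :: hrest) qc p ≤ p.1 * (n + 1) := by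
    intro p hp
    rw [hOQval p hp]
    have hle := qcnt_le_interval (v := p.1) (s := p.2) (b := n + 1) hpw hbN
      (by have := hbN p hp; omega)
    nlinarith [hle]
  -- class-shaped new terms
  have hβ1 : ∀ v : Int, betaQ n hrest qc' (v, 1) = (v - 1) * (n + 1) + cntC v hrest qc' := by
    intro v
    simp only [betaQ, cntC]
    rw [if_pos (by norm_num)]
    ring
  have hβH : ∀ v : Int, betaH n hrest qc' v = (v - 1) * (n + 1) + cntC v hrest qc' :=
    fun v => rfl
  -- O1 : class-shaped values are dominated
  have hClass : ∀ v : Int, 1 ≤ v → v ≤ m →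
      (1 ≤ cntC v (m :: hrest) qc ∨ (2 ≤ m ∧ m - 1 = v)) →
      (v - 1) * (n + 1) + cntC v hrest qc' ≤ phi n (m :: hrest) qc - 1 := by
    intro v hv1 hvm hvc
    rw [cnt_new v]
    rcases eq_or_ne m v with rfl | hvne
    · rw [if_pos rfl, if_neg (by omega)]
      have e : (m - 1) * (n + 1) + (cntC m (m :: hrest) qc - 1 + 0)
          = ((m - 1) * (n + 1) + cntC m (m :: hrest) qc) - 1 := by ring
      rw [e]
      linarith
    · by_cases hw : 2 ≤ m ∧ m - 1 = v
      · obtain ⟨hm2, hveq⟩ := hw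
        subst hveq
        rw [if_neg hvne, if_pos ⟨hm2, rfl⟩]
        have hWc := W_classes (v := m - 1) (m := m) (hc := m :: hrest) (qc := qc)
          (by omega) hposall hq1 hs1
        have hkv0 : 0 ≤ cntC (m - 1) (m :: hrest) qc := by
          have h1 : (0:Int) ≤ ((m :: hrest).count (m - 1) : Int) := by positivity
          have h2 := qcnt_nonneg (m - 1) 1 qc
          simp only [cntC]; omega
        have hdom := dom2 (N := n + 1) hm2 hkv0 hcm1 (by omega) hWc
        have hmax : max (sumC (m :: hrest) qc) ((m - 1) * (n + 1) + cntC m (m :: hrest) qc)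
            ≤ phi n (m :: hrest) qc := max_le hW_le_phi (le_trans hOHm_le hbnd_le_phi)
        linarith
      · have hvc' : 1 ≤ cntC v (m :: hrest) qc := by
          rcases hvc with h | h
          · exact h
          · exact absurd h hw
        have hvm' : v + 1 ≤ m := by
          rcases Decidable.em (m - 1 = v) with h | h
          · exact absurd ⟨by omega, h⟩ hw
          · omega
        have hdom := dom1 (N := n + 1) hv1 hvm' hvc' hcm1 (by omega)
          (W_classes (by omega) hposall hq1 hs1)
        have hmax : max (sumC (m :: hrest) qc) ((m - 1) * (n + 1) + cntC m (m :: hrest) qc)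
            ≤ phi n (m :: hrest) qc := max_le hW_le_phi (le_trans hOHm_le hbnd_le_phi)
        rw [if_neg hvne, if_neg hw]
        linarith
  -- big-class: a queue front with count above every heap count
  have hClassBig : ∀ v : Int, m < v → (v, 2) ∈ qc →
      (v - 1) * (n + 1) + cntC v hrest qc' ≤ phi n (m :: hrest) qc - 1 := by
    intro v hvm hv2
    have hcount0 : ((m :: hrest).count v : Int) = 0 := by
      have : v ∉ m :: hrest := by
        intro hmem
        have := hposall v hmem
        rcases List.mem_cons.1 hmem with rfl | hmem'
        · omega
        · have := hmaxr v hmem'; omega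
      simp [List.count_eq_zero.2 this]
    have hOQ2 := hOQval (v, 2) hv2
    have hOQle := hOQ_le (v, 2) hv2
    rw [cnt_new v]
    rw [if_neg (by omega), if_neg (by intro h; omega)]
    have e : cntC v (m :: hrest) qc = qcnt v 2 qc := by
      simp only [cntC, hcount0, e1q v]; ring
    rw [e]
    simp only at hOQ2
    linarith
  -- new value of a shifted queue item with old start ≥ 3
  have hshift3 : ∀ p ∈ qc, 3 ≤ p.2 →
      betaQ n hrest qc' (p.1, p.2 - 1) = betaQ n (m :: hrest) qc p - 1 +
        (if 2 ≤ m ∧ m - 1 = p.1 then 1 else 0) := by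
    intro p hp h3
    have hb := hbN p hp
    have e2 : p.2 - 1 + 1 = p.2 := by ring
    simp only [betaQ]
    rw [e_q' p.1 (p.2 - 1), e2]
    rw [if_neg (show ¬(p.2 - 1 ≤ 1) by omega), if_neg (show ¬(p.2 ≤ 1) by omega)]
    by_cases hw : 2 ≤ m ∧ m - 1 = p.1
    · rw [if_pos (by exact ⟨hw.1, hw.2, by omega⟩), if_pos hw]
      ring
    · rw [if_neg (by intro h; exact hw ⟨h.1, h.2.1⟩), if_neg hw]
      ring
  -- the appended item (only exists when 2 ≤ m)
  have hqc0 : n = 0 → qc = [] := by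
    intro h0
    cases qc with
    | nil => rfl
    | cons q rest =>
      have := hq q (by simp)
      omega
  have hAval : 1 ≤ n → 2 ≤ m → betaQ n hrest qc' (m - 1, n + 1) = (m - 1) * (n + 1) := by
    intro hn1 hm2
    have hz : qcnt (m - 1) (n + 1 + 1) qc = 0 := qcnt_eq_zero_of_gt hbN (by omega)
    simp only [betaQ]
    rw [e_q' (m - 1) (n + 1), hz]
    rw [if_pos (by exact ⟨hm2, rfl, by omega⟩), if_neg (by omega)]
    ring
  -- membership helpers
  have memH : ∀ v ∈ hrest, betaH n hrest qc' v ∈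
      hrest.map (betaH n hrest qc') ++ qc'.map (betaQ n hrest qc') := by
    intro v hv
    exact List.mem_append_left _ (List.mem_map_of_mem hv)
  have memQ : ∀ p ∈ qc', betaQ n hrest qc' p ∈
      hrest.map (betaH n hrest qc') ++ qc'.map (betaQ n hrest qc') := by
    intro p hp
    exact List.mem_append_right _ (List.mem_map_of_mem hp)
  have memS : ∀ p ∈ qc, (p.1, p.2 - 1) ∈ qc' := by
    intro p hp
    rw [hqc']
    exact List.mem_append_left _ (List.mem_map_of_mem hp)
  have memA : 2 ≤ m → ((m : Int) - 1, n + 1) ∈ qc' := by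
    intro hm2
    rw [hqc', hA, if_pos hm2]
    exact List.mem_append_right _ (by simp)
  -- O1 : every new term is ≤ phi - 1
  have hO1 : ∀ x ∈ hrest.map (betaH n hrest qc') ++ qc'.map (betaQ n hrest qc'),
      x ≤ phi n (m :: hrest) qc - 1 := by
    intro x hx
    rcases List.mem_append.1 hx with hx | hx
    · obtain ⟨v, hv, rfl⟩ := List.mem_map.1 hx
      rw [hβH v]
      exact hClass v (hposr v hv) (hmaxr v hv)
        (Or.inl (by
          have h1 : 1 ≤ ((m :: hrest).count v : Int) := by
            have : 0 < (m :: hrest).count v := List.count_pos_iff.2 (List.mem_cons_of_mem _ hv)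
            omega
          have h2 := qcnt_nonneg v 1 qc
          simp only [cntC]; omega))
    · obtain ⟨p', hp', rfl⟩ := List.mem_map.1 hx
      rw [hqc'] at hp'
      rcases List.mem_append.1 hp' with hp' | hp'
      · rw [hqS] at hp'
        obtain ⟨p, hp, rfl⟩ := List.mem_map.1 hp'
        have hps := h2s p hp
        rcases eq_or_lt_of_le hps with h2 | h3
        · -- old start exactly 2 : lands at start 1, class shape
          have e : (p.1, p.2 - 1) = (p.1, (1 : Int)) := by rw [← h2]; norm_num
          rw [e, hβ1 p.1]
          have hcnt1 : 1 ≤ cntC p.1 (m :: hrest) qc := by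
            have hq2 : 1 ≤ qcnt p.1 1 qc := qcnt_pos_of_mem (by
                have : p = (p.1, p.2) := rfl
                rw [this] at hp; exact hp) (by omega)
            have h1 : (0:Int) ≤ ((m :: hrest).count p.1 : Int) := by positivity
            simp only [cntC]; omega
          rcases le_or_gt p.1 m with hle | hgt
          · exact hClass p.1 (hq1 p hp) hle (Or.inl hcnt1)
          · refine hClassBig p.1 hgt ?_
            have : p = (p.1, (2:Int)) := by
              have : p = (p.1, p.2) := rfl
              rw [this, ← h2]
            rw [← this]; exact hp
        · -- old start ≥ 3
          rw [hshift3 p hp (by omega)]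
          by_cases hw : 2 ≤ m ∧ m - 1 = p.1
          · rw [if_pos hw]
            have := hOQ_bound p hp
            rw [← hw.2] at this
            have hfin : betaQ n (m :: hrest) qc p ≤ (m - 1) * (n + 1) := this
            linarith
          · rw [if_neg hw]
            have := hOQ_le p hp
            linarith
      · -- appended item
        rw [hA] at hp'
        by_cases hm2 : 2 ≤ m
        · rw [if_pos hm2] at hp'
          have hpe : p' = (m - 1, n + 1) := by simpa using hp'
          subst hpe
          rcases eq_or_lt_of_le hn with h0 | hn1
          · -- n = 0 : the appended item has start 1, class shape
            have h0' : n = 0 := h0.symm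
            have e : ((m : Int) - 1, n + 1) = (m - 1, (1 : Int)) := by rw [h0']; norm_num
            rw [e, hβ1 (m - 1)]
            exact hClass (m - 1) (by omega) (by omega) (Or.inr ⟨hm2, rfl⟩)
          · rw [hAval (by omega) hm2]
            linarith
        · rw [if_neg hm2] at hp'
          simp at hp'
  -- O2 : some new term (or the new work) reaches phi - 1
  have hO2 : phi n (m :: hrest) qc - 1 ≤ phi n hrest qc' := by
    rcases le_or_gt (bnd n (m :: hrest) qc) (sumC (m :: hrest) qc) with hbw | hwb
    · have : phi n (m :: hrest) qc = sumC (m :: hrest) qc := max_eq_left hbw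
      rw [this]
      have : sumC hrest qc' ≤ phi n hrest qc' := le_max_left _ _
      linarith [sum_new]
    · have hphib : phi n (m :: hrest) qc = bnd n (m :: hrest) qc := max_eq_right (le_of_lt hwb)
      have hW0 : 0 ≤ sumC (m :: hrest) qc := sumC_nonneg hposall hq1
      have hbpos : 0 < bnd n (m :: hrest) qc := by linarith
      have hbnde : fmax ((m :: hrest).map (betaH n (m :: hrest) qc)
          ++ qc.map (betaQ n (m :: hrest) qc)) = bnd n (m :: hrest) qc := rfl
      have hmem := fmax_pos_mem (l := (m :: hrest).map (betaH n (m :: hrest) qc)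
        ++ qc.map (betaQ n (m :: hrest) qc)) hbpos
      have hgoal : ∃ y ∈ hrest.map (betaH n hrest qc') ++ qc'.map (betaQ n hrest qc'),
          bnd n (m :: hrest) qc - 1 ≤ y := by
        rcases List.mem_append.1 hmem with hx | hx
        · obtain ⟨v, hv, hve⟩ := List.mem_map.1 hx
          rw [hbnde] at hve
          by_cases hvm : v = m
          · -- witness is the heap class of the popped maximum
            subst hvm
            rcases Decidable.em (v ∈ hrest) with hin | hout
            · refine ⟨betaH n hrest qc' v, memH v hin, ?_⟩
              rw [hβH v, cnt_new v, if_pos rfl, if_neg (by omega)]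
              simp only [betaH] at hve
              linarith [hve.le, hve.ge]
            · rcases le_or_gt 1 (qcnt v 1 qc) with hq1c | hq0
              · -- some queue item of class v exists ; take the first one
                obtain ⟨ps, hps, hps1, hps2⟩ := first_class_mem hpw hq1c hs1
                have hcnt_split : cntC v (v :: hrest) qc = 1 + qcnt v 1 qc := by
                  have hc0 : (hrest.count v : Int) = 0 := by
                    simp [List.count_eq_zero.2 hout]
                  simp only [cntC, List.count_cons_self]
                  push_cast
                  omega
                have hs2 := h2s ps hps
                rcases eq_or_lt_of_le hs2 with h2 | h3
                · refine ⟨betaQ n hrest qc' (ps.1, ps.2 - 1), memQ _ (memS ps hps), ?_⟩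
                  have e : (ps.1, ps.2 - 1) = (v, (1:Int)) := by
                    rw [hps1, ← h2]; norm_num
                  rw [e, hβ1 v, cnt_new v, if_pos rfl, if_neg (by omega)]
                  simp only [betaH] at hve
                  linarith [hve.le, hcnt_split.le, hcnt_split.ge]
                · refine ⟨betaQ n hrest qc' (ps.1, ps.2 - 1), memQ _ (memS ps hps), ?_⟩
                  rw [hshift3 ps hps (by omega)]
                  have hOQv := hOQval ps hps
                  have hOQv' : betaQ n (v :: hrest) qc ps =
                      (v - 1) * (n + 1) + ps.2 + qcnt v 1 qc - 1 := by
                    rw [hOQv, hps1, hps2]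
                  simp only [betaH] at hve
                  have hite : (0:Int) ≤ if 2 ≤ v ∧ v - 1 = ps.1 then 1 else 0 := by positivity
                  linarith [hcnt_split.le, hcnt_split.ge, hs2]
              · -- the popped item was the last of its class
                have hcnt1 : cntC v (v :: hrest) qc = 1 := by
                  have hc0 : (hrest.count v : Int) = 0 := by
                    simp [List.count_eq_zero.2 hout]
                  have hqn := qcnt_nonneg v 1 qc
                  simp only [cntC, List.count_cons_self]
                  push_cast
                  omega
                rcases le_or_gt 2 v with hm2 | hm1
                · refine ⟨betaQ n hrest qc' (v - 1, n + 1), memQ _ (memA hm2), ?_⟩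
                  have hself : 1 ≤ qcnt (v - 1) (n + 1) qc' :=
                    qcnt_pos_of_mem (memA hm2) (by omega)
                  have hind : (0:Int) ≤ if n + 1 ≤ 1 then (hrest.count (v - 1) : Int) else 0 := by
                    positivity
                  simp only [betaQ]
                  simp only [betaH, hcnt1] at hve
                  nlinarith [hself, hind, hn]
                · -- m = 1 : bound equals the class count ≤ W, contradiction
                  exfalso
                  have hv1 : v = 1 := by omega
                  have hWc := W_class (v := v) (hc := v :: hrest) (qc := qc) hposall hq1 hs1
                  simp only [betaH] at hve
                  nlinarith [hve.le, hve.ge, hWc, hcnt1.le, hwb]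
          · -- witness is another heap class
            have hvin : v ∈ hrest := by
              rcases List.mem_cons.1 hv with h | h
              · exact absurd h hvm
              · exact h
            refine ⟨betaH n hrest qc' v, memH v hvin, ?_⟩
            rw [hβH v, cnt_new v, if_neg (by omega)]
            have hite : (0:Int) ≤ if 2 ≤ m ∧ m - 1 = v then 1 else 0 := by positivity
            simp only [betaH] at hve
            linarith
        · -- witness is a queue item
          obtain ⟨p, hp, hpe⟩ := List.mem_map.1 hx
          rw [hbnde] at hpe
          have hps := h2s p hp
          rcases eq_or_lt_of_le hps with h2 | h3
          · refine ⟨betaQ n hrest qc' (p.1, p.2 - 1), memQ _ (memS p hp), ?_⟩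
            have e : (p.1, p.2 - 1) = (p.1, (1:Int)) := by rw [← h2]; norm_num
            rw [e, hβ1 p.1]
            have hOQv := hOQval p hp
            rw [← h2] at hOQv
            -- cntC' p.1 ≥ qcnt p.1 2 qc
            have hkey : qcnt p.1 2 qc ≤ cntC p.1 hrest qc' := by
              rw [cnt_new p.1]
              have hsplit : cntC p.1 (m :: hrest) qc =
                  ((m :: hrest).count p.1 : Int) + qcnt p.1 2 qc := by
                simp only [cntC, e1q p.1]
              have hite : (0:Int) ≤ if 2 ≤ m ∧ m - 1 = p.1 then 1 else 0 := by positivity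
              rcases eq_or_ne m p.1 with he | hne
              · rw [if_pos he]
                have : 1 ≤ ((m :: hrest).count p.1 : Int) := by
                  rw [← he, List.count_cons_self]; push_cast; omega
                linarith
              · rw [if_neg hne]
                have : (0:Int) ≤ ((m :: hrest).count p.1 : Int) := by positivity
                linarith
            linarith
          · refine ⟨betaQ n hrest qc' (p.1, p.2 - 1), memQ _ (memS p hp), ?_⟩
            rw [hshift3 p hp (by omega)]
            have hite : (0:Int) ≤ if 2 ≤ m ∧ m - 1 = p.1 then 1 else 0 := by positivity
            linarith
      obtain ⟨y, hy, hley⟩ := hgoal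
      have : y ≤ bnd n hrest qc' := le_fmax hy
      have hb' : bnd n hrest qc' ≤ phi n hrest qc' := le_max_right _ _
      rw [hphib]
      linarith
  -- combine
  have hupper : phi n hrest qc' ≤ phi n (m :: hrest) qc - 1 := by
    apply max_le
    · linarith [sum_new, hW_le_phi]
    · exact fmax_le (by linarith) hO1
  exact le_antisymm hupper hO2

-- ---- relating the port state to the model state ----
lemma qcOf_succ_shift (t : Int) (queue : List (Int × Int)) :
    qcOf (t + 1) queue = (qcOf t queue).map (fun p => (p.1, p.2 - 1)) := by
  simp only [qcOf, List.map_map]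
  apply List.map_congr_left
  intro q _
  simp only [Function.comp, Prod.mk.injEq]
  refine ⟨trivial, by ring⟩

lemma qcOf_append (t : Int) (q1 q2 : List (Int × Int)) :
    qcOf t (q1 ++ q2) = qcOf t q1 ++ qcOf t q2 := by
  simp [qcOf]

lemma qcOf_cons (t : Int) (q : Int × Int) (rest : List (Int × Int)) :
    qcOf t (q :: rest) = (-q.1, q.2 - t + 1) :: qcOf t rest := rfl

lemma phi_nonneg {n : Int} {hc : List Int} {qc : List (Int × Int)}
    (h1 : ∀ v ∈ hc, 1 ≤ v) (h2 : ∀ p ∈ qc, 1 ≤ p.1) : 0 ≤ phi n hc qc :=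
  le_trans (sumC_nonneg h1 h2) (le_max_left _ _)

lemma phi_empty (n : Int) : phi n [] [] = 0 := by
  simp [phi, sumC, bnd, fmax]

/-- the invariant the port's loop maintains -/
def PortInv (n : Int) (heap : List Int) (queue : List (Int × Int)) (t : Int) : Prop :=
  heap.Pairwise (· ≤ ·) ∧ (∀ x ∈ heap, x ≤ -1) ∧
  (∀ p ∈ queue, p.1 ≤ -1 ∧ t + 1 ≤ p.2 ∧ p.2 ≤ t + n) ∧
  (queue.map Prod.snd).Pairwise (· < ·)

lemma portInv_model {n : Int} {heap : List Int} {queue : List (Int × Int)} {t : Int}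
    (h : PortInv n heap queue t) :
    (∀ v ∈ hcOf heap, 1 ≤ v) ∧
    (∀ p ∈ qcOf t queue, 1 ≤ p.1 ∧ 2 ≤ p.2 ∧ p.2 ≤ n + 1) ∧
    ((qcOf t queue).map Prod.snd).Pairwise (· < ·) := by
  obtain ⟨hs, hh, hqq, hpw⟩ := h
  refine ⟨?_, ?_, ?_⟩
  · intro v hv
    obtain ⟨x, hx, rfl⟩ := List.mem_map.1 hv
    have := hh x hx; omega
  · intro p hp
    obtain ⟨q, hq, rfl⟩ := List.mem_map.1 hp
    have := hqq q hq
    constructor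
    · simp; omega
    · constructor <;> simp <;> omega
  · have : (qcOf t queue).map Prod.snd = (queue.map Prod.snd).map (fun r => r - t + 1) := by
      simp only [qcOf, List.map_map]
      apply List.map_congr_left
      intro q _
      rfl
    rw [this]
    exact List.Pairwise.map _ (fun a b hab => by omega) hpw

-- ---- unfolding the loop body ----
lemma leastLoop_step (n : Int) (f : Nat) (heap : List Int) (queue : List (Int × Int))
    (t : Int) (hne : ¬(heap = [] ∧ queue = [])) :
    leastLoop n (f + 1) heap queue t =
      leastLoop n f
        (frontStep (popStep heap queue (t + 1) n).1 (popStep heap queue (t + 1) n).2 (t + 1)).1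
        (frontStep (popStep heap queue (t + 1) n).1 (popStep heap queue (t + 1) n).2 (t + 1)).2
        (t + 1) := by
  simp only [leastLoop]
  rw [if_neg hne]

lemma pairFst {α β : Type} (a : α) (b : β) : (a, b).1 = a := rfl
lemma pairSnd {α β : Type} (a : α) (b : β) : (a, b).2 = b := rfl

-- ---- the loop computes t + phi ----
lemma loop_eq {n : Int} (hn : 0 ≤ n) : ∀ (fuel : Nat) (heap : List Int)
    (queue : List (Int × Int)) (t : Int),
    PortInv n heap queue t →
    phi n (hcOf heap) (qcOf t queue) ≤ (fuel : Int) →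
    leastLoop n fuel heap queue t = t + phi n (hcOf heap) (qcOf t queue) := by
  intro fuel
  induction fuel with
  | zero =>
    intro heap queue t hInv hf
    obtain ⟨hm1, hm2, hm3⟩ := portInv_model hInv
    have h0 := phi_nonneg (n := n) hm1 (fun p hp => (hm2 p hp).1)
    have he : phi n (hcOf heap) (qcOf t queue) = 0 := le_antisymm (by exact_mod_cast hf) h0
    rw [he]
    simp [leastLoop]
  | succ f ih =>
    intro heap queue t hInv hf
    obtain ⟨hsort, hheap, hqueue, hpw⟩ := hInv
    obtain ⟨hm1, hm2, hm3⟩ := portInv_model (⟨hsort, hheap, hqueue, hpw⟩ : PortInv n heap queue t)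
    by_cases hemp : heap = [] ∧ queue = []
    · obtain ⟨rfl, rfl⟩ := hemp
      have h1 : hcOf ([] : List Int) = [] := rfl
      have h2 : qcOf t ([] : List (Int × Int)) = [] := rfl
      rw [h1, h2, phi_empty]
      simp [leastLoop]
    · rw [leastLoop_step n f heap queue t hemp]
      cases heap with
      | nil =>
        cases queue with
        | nil => exact absurd ⟨rfl, rfl⟩ hemp
        | cons q qs =>
          obtain ⟨qc, qr⟩ := q
          rw [show popStep [] ((qc, qr) :: qs) (t + 1) n = ([], (qc, qr) :: qs) from rfl,
            pairFst, pairSnd]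
          have hq0 := hqueue (qc, qr) (by simp)
          have hpw' : List.Pairwise (· < ·) (qr :: qs.map Prod.snd) := by
            rw [List.map_cons] at hpw; exact hpw
          have hqtail : ∀ p ∈ qs, qr < p.2 := by
            have := (List.pairwise_cons.1 hpw').1
            intro p hp
            exact this p.2 (List.mem_map_of_mem hp)
          have hpwtail : (qs.map Prod.snd).Pairwise (· < ·) :=
            (List.pairwise_cons.1 hpw').2
          have hidle := step_idle (qc := qcOf t ((qc, qr) :: qs)) hn (by simp [qcOf]) hm2 hm3
          rw [← qcOf_succ_shift] at hidle
          rw [show hcOf ([] : List Int) = [] from rfl] at hf ⊢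
          by_cases hr : qr = t + 1
          · -- the front comes back into the heap
            have hfs : frontStep [] ((qc, qr) :: qs) (t + 1) = ([qc], qs) := by
              simp only [frontStep]
              rw [if_pos hr]
              rfl
            rw [hfs, pairFst, pairSnd]
            have hrw : qcOf (t + 1) ((qc, qr) :: qs) = (-qc, 1) :: qcOf (t + 1) qs := by
              rw [qcOf_cons]
              have e : (qc, qr).2 - (t + 1) + 1 = 1 := by simp only; omega
              simp only at e ⊢
              rw [e]
            have hrest2 : ∀ p ∈ qcOf (t + 1) qs, 2 ≤ p.2 := by
              intro p hp
              obtain ⟨q', hq', rfl⟩ := List.mem_map.1 hp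
              have := hqtail q' hq'
              simp only
              omega
            have hmv := move_phi n (-qc) [] (qcOf (t + 1) qs) hrest2
            rw [hrw, hmv] at hidle
            have hInv' : PortInv n [qc] qs (t + 1) := by
              refine ⟨by simp, by intro y hy; simp at hy; omega, ?_, hpwtail⟩
              intro p hp
              have h1 := hqueue p (by simp [hp])
              have h2 := hqtail p hp
              exact ⟨h1.1, by omega, by omega⟩
            have hhc1 : hcOf [qc] = [-qc] := rfl
            have hfuel' : phi n (hcOf [qc]) (qcOf (t + 1) qs) ≤ (f : Int) := by
              rw [hhc1]
              push_cast at hf ⊢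
              omega
            rw [ih [qc] qs (t + 1) hInv' hfuel', hhc1]
            omega
          · -- idle step, nothing comes back yet
            have hfs : frontStep [] ((qc, qr) :: qs) (t + 1) = ([], (qc, qr) :: qs) := by
              simp only [frontStep]
              rw [if_neg hr]
            rw [hfs, pairFst, pairSnd]
            have hInv' : PortInv n [] ((qc, qr) :: qs) (t + 1) := by
              refine ⟨by simp, by simp, ?_, hpw⟩
              intro p hp
              have h1 := hqueue p hp
              rcases List.mem_cons.1 hp with rfl | hp'
              · exact ⟨h1.1, by simp only at h1 ⊢; omega, by simp only at h1 ⊢; omega⟩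
              · have := hqtail p hp'
                exact ⟨h1.1, by omega, by omega⟩
            have hfuel' : phi n (hcOf []) (qcOf (t + 1) ((qc, qr) :: qs)) ≤ (f : Int) := by
              rw [show hcOf ([] : List Int) = [] from rfl]
              push_cast at hf ⊢
              omega
            rw [ih [] ((qc, qr) :: qs) (t + 1) hInv' hfuel',
              show hcOf ([] : List Int) = [] from rfl]
            omega
      | cons x hs =>
        have hx1 : x ≤ -1 := hheap x (by simp)
        have hxs : ∀ y ∈ hs, x ≤ y := (List.pairwise_cons.1 hsort).1
        have hstail : hs.Pairwise (· ≤ ·) := (List.pairwise_cons.1 hsort).2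
        have hhstail : ∀ y ∈ hs, y ≤ -1 := fun y hy => hheap y (by simp [hy])
        have hhc : hcOf (x :: hs) = (-x) :: hcOf hs := rfl
        have hstep := step_phi (n := n) (m := -x) (hrest := hcOf hs) (qc := qcOf t queue)
          hn (by omega)
          (by intro v hv; obtain ⟨y, hy, rfl⟩ := List.mem_map.1 hv; have := hxs y hy; omega)
          (by intro v hv; obtain ⟨y, hy, rfl⟩ := List.mem_map.1 hv
              have := hhstail y hy; omega)
          hm2 hm3
        rw [← hhc] at hstep
        set queue1 := if x + 1 < 0 then queue ++ [(x + 1, t + 1 + n)] else queue with hq1def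
        have hps : popStep (x :: hs) queue (t + 1) n = (hs, queue1) := by
          rw [hq1def]
          simp only [popStep]
          by_cases hx2 : x + 1 < 0
          · rw [if_pos hx2, if_pos hx2]
          · rw [if_neg hx2, if_neg hx2]
        have hq1model : qcOf (t + 1) queue1 =
            (qcOf t queue).map (fun p => (p.1, p.2 - 1)) ++
              (if 2 ≤ -x then [(-x - 1, n + 1)] else []) := by
          rw [hq1def]
          by_cases hx2 : x + 1 < 0
          · rw [if_pos hx2, if_pos (by omega), qcOf_append, qcOf_succ_shift]
            congr 1
            show [(-(x + 1), t + 1 + n - (t + 1) + 1)] = [(-x - 1, n + 1)]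
            have e1 : -(x + 1) = -x - 1 := by ring
            have e2 : t + 1 + n - (t + 1) + 1 = n + 1 := by ring
            rw [e1, e2]
          · rw [if_neg hx2, if_neg (by omega), qcOf_succ_shift, List.append_nil]
        rw [← hq1model] at hstep
        have hq1mem : ∀ p ∈ queue1, p.1 ≤ -1 ∧ t + 1 ≤ p.2 ∧ p.2 ≤ t + 1 + n := by
          intro p hp
          rw [hq1def] at hp
          by_cases hx2 : x + 1 < 0
          · rw [if_pos hx2] at hp
            rcases List.mem_append.1 hp with hp | hp
            · have := hqueue p hp; exact ⟨this.1, by omega, by omega⟩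
            · simp only [List.mem_singleton] at hp
              subst hp
              refine ⟨?_, ?_, ?_⟩ <;> simp <;> omega
          · rw [if_neg hx2] at hp
            have := hqueue p hp; exact ⟨this.1, by omega, by omega⟩
        have hq1pw : (queue1.map Prod.snd).Pairwise (· < ·) := by
          rw [hq1def]
          by_cases hx2 : x + 1 < 0
          · rw [if_pos hx2, List.map_append, List.pairwise_append]
            refine ⟨hpw, by simp, ?_⟩
            intro a ha b hb
            obtain ⟨p, hp, rfl⟩ := List.mem_map.1 ha
            have := hqueue p hp
            simp only [List.map_cons, List.map_nil, List.mem_singleton] at hb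
            omega
          · rw [if_neg hx2]; exact hpw
        rw [hps, pairFst, pairSnd]
        clear_value queue1
        clear hq1def hps
        cases queue1 with
        | nil =>
          rw [show frontStep hs [] (t + 1) = (hs, []) from rfl, pairFst, pairSnd]
          have hInv' : PortInv n hs [] (t + 1) := ⟨hstail, hhstail, by simp, by simp⟩
          have hfuel' : phi n (hcOf hs) (qcOf (t + 1) []) ≤ (f : Int) := by
            push_cast at hf ⊢
            omega
          rw [ih hs [] (t + 1) hInv' hfuel']
          omega
        | cons q1 qs1 =>
          obtain ⟨c, r⟩ := q1
          have hq1head := hq1mem (c, r) (by simp)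
          have hq1pw' : List.Pairwise (· < ·) (r :: qs1.map Prod.snd) := by
            rw [List.map_cons] at hq1pw; exact hq1pw
          have hq1tailgt : ∀ p ∈ qs1, r < p.2 := by
            have := (List.pairwise_cons.1 hq1pw').1
            intro p hp
            exact this p.2 (List.mem_map_of_mem hp)
          have hq1pwtail : (qs1.map Prod.snd).Pairwise (· < ·) :=
            (List.pairwise_cons.1 hq1pw').2
          by_cases hr : r = t + 1
          · -- front of the queue returns to the heap
            have hfs : frontStep hs ((c, r) :: qs1) (t + 1) =
                (List.orderedInsert (· ≤ ·) c hs, qs1) := by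
              simp only [frontStep]
              rw [if_pos hr]
            rw [hfs, pairFst, pairSnd]
            have hrw : qcOf (t + 1) ((c, r) :: qs1) = (-c, 1) :: qcOf (t + 1) qs1 := by
              rw [qcOf_cons]
              have e : (c, r).2 - (t + 1) + 1 = 1 := by simp only; omega
              simp only at e ⊢
              rw [e]
            have hrest2 : ∀ p ∈ qcOf (t + 1) qs1, 2 ≤ p.2 := by
              intro p hp
              obtain ⟨q', hq', rfl⟩ := List.mem_map.1 hp
              have := hq1tailgt q' hq'
              simp only
              omega
            have hmv := move_phi n (-c) (hcOf hs) (qcOf (t + 1) qs1) hrest2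
            rw [hrw, hmv] at hstep
            have hperm : (hcOf (List.orderedInsert (· ≤ ·) c hs)).Perm (-c :: hcOf hs) :=
              (List.perm_orderedInsert _ c hs).map (fun y => -y)
            have hpp := phi_perm n (qcOf (t + 1) qs1) hperm
            rw [← hpp] at hstep
            have hInv' : PortInv n (List.orderedInsert (· ≤ ·) c hs) qs1 (t + 1) := by
              refine ⟨List.Sorted.orderedInsert c hs hstail, ?_, ?_, hq1pwtail⟩
              · intro y hy
                rcases (List.mem_orderedInsert _).1 hy with rfl | hy'
                · exact hq1head.1
                · exact hhstail y hy'
              · intro p hp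
                have h1 := hq1mem p (by simp [hp])
                have h2 := hq1tailgt p hp
                exact ⟨h1.1, by omega, by omega⟩
            have hfuel' : phi n (hcOf (List.orderedInsert (· ≤ ·) c hs))
                (qcOf (t + 1) qs1) ≤ (f : Int) := by
              push_cast at hf ⊢
              omega
            rw [ih _ qs1 (t + 1) hInv' hfuel']
            omega
          · -- front stays in the queue
            have hfs : frontStep hs ((c, r) :: qs1) (t + 1) = (hs, (c, r) :: qs1) := by
              simp only [frontStep]
              rw [if_neg hr]
            rw [hfs, pairFst, pairSnd]
            have hInv' : PortInv n hs ((c, r) :: qs1) (t + 1) := by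
              refine ⟨hstail, hhstail, ?_, hq1pw⟩
              intro p hp
              rcases List.mem_cons.1 hp with rfl | hp'
              · exact ⟨hq1head.1, by simp only at hq1head ⊢; omega,
                  by simp only at hq1head ⊢; omega⟩
              · have h1 := hq1mem p (by simp [hp'])
                have h2 := hq1tailgt p hp'
                exact ⟨h1.1, by omega, by omega⟩
            have hfuel' : phi n (hcOf hs) (qcOf (t + 1) ((c, r) :: qs1)) ≤ (f : Int) := by
              push_cast at hf ⊢
              omega
            rw [ih hs ((c, r) :: qs1) (t + 1) hInv' hfuel']
            omega

-- ---- the potential of the initial state is the closed form ----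
lemma phi_init (n : Int) (vals : List Int) (m : Int) (hn : 0 ≤ n)
    (hpos : ∀ v ∈ vals, 1 ≤ v) (hmm : m ∈ vals) (hmax : ∀ v ∈ vals, v ≤ m) :
    phi n vals [] = max vals.sum ((m - 1) * (n + 1) + (vals.count m : Int)) := by
  have hsum : sumC vals [] = vals.sum := by simp [sumC]
  have hbH : ∀ v : Int, betaH n vals [] v = (v - 1) * (n + 1) + (vals.count v : Int) := by
    intro v; simp [betaH, cntC, qcnt]
  have hcm1 : 1 ≤ (vals.count m : Int) := by
    have := List.count_pos_iff.2 hmm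
    omega
  have hm1 : 1 ≤ m := hpos m hmm
  have hs1 : m * (vals.count m : Int) ≤ vals.sum := sum_ge_class hpos m
  have hsum1 : 1 ≤ vals.sum := by nlinarith
  have hOHm_le : (m - 1) * (n + 1) + (vals.count m : Int) ≤ bnd n vals [] := by
    rw [← hbH m]
    apply le_fmax
    simp only [List.mem_append, List.mem_map, List.map_nil]
    exact Or.inl ⟨m, hmm, rfl⟩
  apply le_antisymm
  · apply max_le
    · rw [hsum]; exact le_max_left _ _
    · apply fmax_le (by omega)
      intro x hx
      simp only [List.mem_append, List.mem_map, List.map_nil, List.not_mem_nil,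
        false_and, exists_false, or_false] at hx
      obtain ⟨v, hv, rfl⟩ := hx
      rw [hbH v]
      rcases eq_or_ne v m with rfl | hne
      · exact le_max_right _ _
      · have hvc : 1 ≤ (vals.count v : Int) := by
          have := List.count_pos_iff.2 hv
          omega
        have hdom := dom1 (N := n + 1) (hpos v hv)
          (by have := hmax v hv; omega) hvc hcm1 (by omega)
          (sum_ge_classes hpos v m hne)
        omega
  · apply max_le
    · rw [← hsum]; exact le_max_left _ _
    · exact le_trans hOHm_le (le_max_right _ _)

-- ---- the loop on an all-(-1) heap finishes in heap.length steps ----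
lemma loop_ones (n : Int) : ∀ (f : Nat) (heap : List Int) (t : Int),
    (∀ x ∈ heap, x = -1) → heap.length ≤ f →
    leastLoop n f heap [] t = t + heap.length := by
  intro f
  induction f with
  | zero =>
    intro heap t h hl
    have : heap = [] := List.length_eq_zero_iff.1 (by omega)
    subst this
    simp [leastLoop]
  | succ f ih =>
    intro heap t h hl
    cases heap with
    | nil => simp [leastLoop]
    | cons x hs =>
      rw [leastLoop_step n f (x :: hs) [] t (by simp)]
      have hx : x = -1 := h x (by simp)
      have hps : popStep (x :: hs) [] (t + 1) n = (hs, []) := by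
        simp only [popStep]
        rw [if_neg (by omega)]
      rw [hps, pairFst, pairSnd,
        show frontStep hs [] (t + 1) = (hs, []) from rfl, pairFst, pairSnd]
      rw [ih hs (t + 1) (fun y hy => h y (by simp [hy])) (by simpa using Nat.le_of_succ_le_succ (by simpa using hl))]
      simp only [List.length_cons]
      push_cast
      ring

-- ---- what Counter(tasks).values() is ----
lemma counter_values (tasks : List String) :
    (PySem.Dict.counter tasks).values =
      (PySem.Set.ofList tasks).map (fun k => (tasks.count k : Int)) := by
  have hv : (PySem.Dict.counter tasks).values =
      ((PySem.Dict.counter tasks).items).map Prod.snd := rfl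
  rw [hv, PySem.Dict.items_counter, List.map_map]
  rfl

lemma cast_sum_map {α : Type} (l : List α) (f : α → Nat) :
    (l.map (fun a => (f a : Int))).sum = ((l.map f).sum : Int) := by
  induction l with
  | nil => simp
  | cons a t ih => simp [ih]

lemma counter_sum (tasks : List String) :
    ((PySem.Dict.counter tasks).values).sum = (tasks.length : Int) := by
  rw [counter_values]
  have hperm : (PySem.Set.ofList tasks : List String).Perm tasks.dedup := by
    rw [List.perm_ext_iff_of_nodup (PySem.Set.nodup_ofList tasks) (List.nodup_dedup tasks)]
    intro a; rw [PySem.Set.mem_ofList, List.mem_dedup]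
  rw [(hperm.map (fun k => (tasks.count k : Int))).sum_eq, cast_sum_map]
  norm_cast
  exact List.sum_map_count_dedup_eq_length tasks

lemma counter_pos (tasks : List String) :
    ∀ v ∈ (PySem.Dict.counter tasks).values, 1 ≤ v := by
  rw [counter_values]
  intro v hv
  obtain ⟨k, hk, rfl⟩ := List.mem_map.1 hv
  have : k ∈ tasks := (PySem.Set.mem_ofList tasks k).1 hk
  have := List.count_pos_iff.2 this
  omega

lemma counter_ne_nil {tasks : List String} (h : tasks ≠ []) :
    (PySem.Dict.counter tasks).values ≠ [] := by
  rw [counter_values]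
  obtain ⟨a, ha⟩ := List.exists_mem_of_ne_nil tasks h
  intro hcon
  rw [List.map_eq_nil_iff] at hcon
  have : a ∈ PySem.Set.ofList tasks := (PySem.Set.mem_ofList tasks a).2 ha
  rw [hcon] at this
  exact List.not_mem_nil this

lemma counter_ones {tasks : List String} (h : tasks.Nodup) :
    ∀ v ∈ (PySem.Dict.counter tasks).values, v = 1 := by
  rw [counter_values]
  intro v hv
  obtain ⟨k, hk, rfl⟩ := List.mem_map.1 hv
  have hmem : k ∈ tasks := (PySem.Set.mem_ofList tasks k).1 hk
  rw [List.count_eq_one_of_mem h hmem]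
  norm_num

lemma len_le_sum {l : List Int} (h : ∀ x ∈ l, 1 ≤ x) : (l.length : Int) ≤ l.sum := by
  induction l with
  | nil => simp
  | cons a t ih =>
    have := h a (by simp)
    have := ih (fun x hx => h x (by simp [hx]))
    simp only [List.length_cons, List.sum_cons]
    push_cast
    omega

lemma sum_ones {l : List Int} (h : ∀ x ∈ l, x = 1) : l.sum = l.length := by
  induction l with
  | nil => simp
  | cons a t ih =>
    have := h a (by simp)
    have := ih (fun x hx => h x (by simp [hx]))
    simp only [List.length_cons, List.sum_cons]
    push_cast
    omega

theorem least_time_spec : Claim_equal_least_time := by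
  intro tasks n _hdom hpre
  unfold Spec_least_time
  by_cases htasks : tasks = []
  · subst htasks
    have hof : PySem.Set.ofList ([] : List String) = [] := by
      rw [List.eq_nil_iff_forall_not_mem]
      intro a ha
      exact absurd ((PySem.Set.mem_ofList [] a).1 ha) (List.not_mem_nil)
    have hv : (PySem.Dict.counter ([] : List String)).values = [] := by
      rw [counter_values, hof]
      rfl
    show least_time [] n = least_time_alt [] n
    simp only [least_time, least_time_alt, if_pos rfl, hv]
    rw [show PySem.List.sorted (List.map (fun c => -c) ([] : List Int)) (fun x => x) false
        = [] from rfl]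
    simp [leastLoop]
  · set vals := (PySem.Dict.counter tasks).values with hvals
    have hvne : vals ≠ [] := counter_ne_nil htasks
    have hvpos : ∀ v ∈ vals, 1 ≤ v := counter_pos tasks
    have hvsum : vals.sum = (tasks.length : Int) := counter_sum tasks
    obtain ⟨mv, hmv⟩ : ∃ mv, PySem.List.max? vals (fun v => v) = some mv := by
      cases hc : PySem.List.max? vals (fun v => v) with
      | none => exact absurd ((PySem.List.max?_eq_none_iff _ _).1 hc) hvne
      | some m => exact ⟨m, rfl⟩
    have hmvmem : mv ∈ vals := PySem.List.max?_mem hmv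
    have hmvmax : ∀ v ∈ vals, v ≤ mv := PySem.List.max?_isMax hmv
    have hmv1 : 1 ≤ mv := hvpos mv hmvmem
    have hcount1 : 1 ≤ (vals.count mv : Int) := by
      have := List.count_pos_iff.2 hmvmem
      omega
    have hBval : least_time_alt tasks n =
        max (tasks.length : Int) ((mv - 1) * (n + 1) + (vals.count mv : Int)) := by
      simp only [least_time_alt, if_neg htasks]
      rw [← hvals, hmv, Option.getD_some, PySem.List.count_eq, PySem.List.len_eq]
    set heap0 := PySem.List.sorted (vals.map (fun c => -c)) (fun x => x) false with hheap0
    have hperm : heap0.Perm (vals.map (fun c => -c)) := PySem.List.sorted_perm _ _ _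
    have hpermc : (hcOf heap0).Perm vals := by
      have h2 := hperm.map (fun y : Int => -y)
      have h3 : (vals.map (fun c : Int => -c)).map (fun y : Int => -y) = vals := by
        rw [List.map_map]
        simp
      rw [h3] at h2
      exact h2
    have hsorted : heap0.Pairwise (· ≤ ·) := by
      have := PySem.List.sorted_pairwise (vals.map (fun c => -c)) (fun x : Int => x)
      simpa using this
    have hle : ∀ x ∈ heap0, x ≤ -1 := by
      intro x hx
      have hx' : x ∈ vals.map (fun c => -c) := hperm.mem_iff.1 hx
      obtain ⟨v, hv, rfl⟩ := List.mem_map.1 hx'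
      have := hvpos v hv
      omega
    have hInv0 : PortInv n heap0 [] 0 := ⟨hsorted, hle, by simp, by simp⟩
    have hq0 : qcOf 0 [] = [] := rfl
    have hlenW : 1 ≤ (tasks.length : Int) := by
      have : 0 < tasks.length := List.length_pos_iff.2 htasks
      omega
    rcases le_or_gt 0 n with hn | hn
    · -- 0 ≤ n : the potential-function path
      have hphi := phi_perm n ([] : List (Int × Int)) hpermc
      have hinit := phi_init n vals mv hn hvpos hmvmem hmvmax
      have hphi0 : phi n (hcOf heap0) (qcOf 0 []) =
          max (tasks.length : Int) ((mv - 1) * (n + 1) + (vals.count mv : Int)) := by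
        rw [hq0, hphi, hinit, hvsum]
      have hmW : mv ≤ (tasks.length : Int) := by
        have h1 := sum_ge_class hvpos mv
        nlinarith [hvsum]
      have hkW : (vals.count mv : Int) ≤ (tasks.length : Int) := by
        have h1 : (vals.count mv : Int) ≤ (vals.length : Int) := by
          exact_mod_cast List.count_le_length
        have h2 := len_le_sum hvpos
        omega
      have hfuel : phi n (hcOf heap0) (qcOf 0 []) ≤
          ((tasks.length * (n.toNat + 2) + 1 : Nat) : Int) := by
        rw [hphi0]
        push_cast
        rw [Int.toNat_of_nonneg hn]
        apply max_le
        · nlinarith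
        · nlinarith
      have hA := loop_eq hn (tasks.length * (n.toNat + 2) + 1) heap0 [] 0 hInv0 hfuel
      show least_time tasks n = _
      simp only [least_time]
      rw [← hvals, ← hheap0, hA, hphi0, hBval, zero_add]
    · -- n < 0 : tasks has no duplicates, every count is 1
      have hnodup : tasks.Nodup := by
        rcases hpre with h | h
        · omega
        · exact h
      have hones : ∀ v ∈ vals, v = 1 := counter_ones hnodup
      have honesheap : ∀ x ∈ heap0, x = -1 := by
        intro x hx
        have hx' : x ∈ vals.map (fun c => -c) := hperm.mem_iff.1 hx
        obtain ⟨v, hv, rfl⟩ := List.mem_map.1 hx'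
        rw [hones v hv]
      have hlenv : vals.sum = (vals.length : Int) := sum_ones hones
      have hlen : vals.length = tasks.length := by
        have : (vals.length : Int) = (tasks.length : Int) := by omega
        exact_mod_cast this
      have hlh : heap0.length = vals.length := by
        rw [hperm.length_eq, List.length_map]
      have hfuel : heap0.length ≤ tasks.length * (n.toNat + 2) + 1 := by
        have h1 : heap0.length = tasks.length := by rw [hlh, hlen]
        have h2 := Nat.mul_le_mul_left tasks.length (show 1 ≤ n.toNat + 2 by omega)
        omega
      have hA := loop_ones n (tasks.length * (n.toNat + 2) + 1) heap0 0 honesheap hfuel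
      have hmve : mv = 1 := hones mv hmvmem
      have hcount : vals.count mv = vals.length :=
        List.count_eq_length.2 (fun b hb => by rw [hones b hb, hmve])
      show least_time tasks n = _
      simp only [least_time]
      rw [← hvals, ← hheap0, hA, hBval, hcount, hmve]
      rw [show ((1 : Int) - 1) * (n + 1) = 0 from by ring, hlh, hlen]
      omega
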